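-- pv_equiv track=rewrite | github.com/devsosin/SBook | AlgorithmNote/Greedy/muji.py | solution
-- ===== SOURCE A (Python) =====
-- import heapq
--
-- def solution(food_times, K):
--     if sum(food_times) <= K:
--         return -1
--
--     q = []
--     for i in range(len(food_times)):
--         heapq.heappush(q, (food_times[i], i+1))
--
--     previous = 0
--     length = len(q)
--     while K >= (q[0][0] - previous) * length:
--         now, idx = heapq.heappop(q)
--         K -= (now-previous)*length
--         previous = now
--         length -= 1
--
--     q = sorted(q, key=lambda i : i[1])
--     return q[K%length][1]
-- ===== SOURCE B (Python) =====
-- def solution(food_times, K):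
--     # Closed-form + binary search: no heap, no pop/pointer walk.
--     n = len(food_times)
--     total = sum(food_times)
--     if total <= K:
--         return -1
--     vs = sorted(food_times)
--     prefix = [0]
--     for v in vs:
--         prefix.append(prefix[-1] + v)
--
--     def cost(j):
--         # total time units consumed once the j smallest foods are fully eaten
--         return prefix[j] + (n - j) * vs[j - 1] if j > 0 else 0
--
--     # k = number of fully eaten foods = largest j with cost(j) <= K
--     # (cost is nondecreasing on [1, n] and cost(n) = total > K)
--     if K < cost(1):
--         k = 0
--     else:
--         lo, hi = 1, n - 1
--         while lo < hi:
--             mid = (lo + hi + 1) // 2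
--             if cost(mid) <= K:
--                 lo = mid
--             else:
--                 hi = mid - 1
--         k = lo
--     K -= cost(k)
--     if k == 0:
--         survivors = list(range(1, n + 1))
--     else:
--         thr = vs[k - 1]
--         survivors = [i + 1 for i, t in enumerate(food_times) if t > thr]
--     return survivors[K % len(survivors)]
-- ===== Notes on version B (the rewrite author's own statement) =====
-- stated objective: alternative
-- what changed: B never simulates eating: it sorts the values, derives a closed-form cost(j) for fully eating the j smallest foods from prefix sums, binary-searches the largest j with cost(j) <= K, and picks the survivor by filtering the original list against the value threshold, instead of A's heap of (time,index) pairs popped one by one with running subtraction and a final index sort.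
-- outside the precondition, e.g. on solution([], -1): A raises IndexError, B raises IndexError
import Mathlib
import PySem

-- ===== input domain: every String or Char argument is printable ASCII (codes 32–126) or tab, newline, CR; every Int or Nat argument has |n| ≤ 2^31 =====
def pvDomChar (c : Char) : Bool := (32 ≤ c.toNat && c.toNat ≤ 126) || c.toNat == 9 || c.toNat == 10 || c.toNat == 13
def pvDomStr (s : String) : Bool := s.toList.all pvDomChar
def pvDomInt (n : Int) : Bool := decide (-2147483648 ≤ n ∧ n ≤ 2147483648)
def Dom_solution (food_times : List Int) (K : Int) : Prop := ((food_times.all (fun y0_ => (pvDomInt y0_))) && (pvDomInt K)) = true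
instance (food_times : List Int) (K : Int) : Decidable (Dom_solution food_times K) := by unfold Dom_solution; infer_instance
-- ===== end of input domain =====

-- B replaces A's heap simulation (pop foods one by one, subtracting elapsed time) by a
-- closed-form cost function over prefix sums of the sorted values, a binary search for the
-- number of fully eaten foods, and a threshold filter of the original list for the survivor.

-- ===== PORT A =====
-- Python compares the (food_time, index) tuples lexicographically: Lex order on ℤ × ℤ.
def pvLt (a b : Int × Int) : Bool := decide (toLex a < toLex b)

-- hand port of heapq._siftdown(heap, 0, pos) (CPython: bubble the carried item up,
-- writing each greater parent down, finally store newitem); exact step for step,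
-- heap[p] read as getD (all reads are in range when pos < len).
def pvSiftdownAux (fuel : Nat) (heap : List (Int × Int)) (pos : Nat)
    (newitem : Int × Int) : List (Int × Int) :=
  match fuel with
  | 0 => heap.set pos newitem        -- fuel ≥ pos always: here pos = 0, the loop exit
  | fuel + 1 =>
    if 0 < pos then
      let parentpos := (pos - 1) / 2
      let parent := heap.getD parentpos (0, 0)
      if pvLt newitem parent then pvSiftdownAux fuel (heap.set pos parent) parentpos newitem
      else heap.set pos newitem
    else heap.set pos newitem

def pvSiftdown (heap : List (Int × Int)) (pos : Nat) (newitem : Int × Int) :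
    List (Int × Int) :=
  pvSiftdownAux pos heap pos newitem

-- hand port of the descending loop of heapq._siftup (CPython: move the hole down along
-- the smaller-child path to a leaf, copying children up); returns the array and the
-- final hole position; exact step for step.
def pvSiftupLoopAux (fuel : Nat) (heap : List (Int × Int)) (pos : Nat) :
    List (Int × Int) × Nat :=
  match fuel with
  | 0 => (heap, pos)                 -- fuel ≥ heap.length - pos always: here the loop exit
  | fuel + 1 =>
    let endpos := heap.length
    let childpos := 2 * pos + 1
    if childpos < endpos then
      let rightpos := childpos + 1
      let childpos :=
        if rightpos < endpos ∧
            ¬ pvLt (heap.getD childpos (0, 0)) (heap.getD rightpos (0, 0)) then rightpos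
        else childpos
      pvSiftupLoopAux fuel (heap.set pos (heap.getD childpos (0, 0))) childpos
    else (heap, pos)

def pvSiftupLoop (heap : List (Int × Int)) (pos : Nat) :
    List (Int × Int) × Nat :=
  pvSiftupLoopAux heap.length heap pos

-- heapq._siftup(heap, 0): sink the hole to a leaf, then _siftdown the carried item.
def pvSiftup (heap : List (Int × Int)) (newitem : Int × Int) : List (Int × Int) :=
  let (h, p) := pvSiftupLoop heap 0
  pvSiftdown h p newitem

-- heapq.heappush: append, then _siftdown(heap, 0, len-1).
def pvHeappush (heap : List (Int × Int)) (item : Int × Int) : List (Int × Int) :=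
  pvSiftdown (heap ++ [item]) heap.length item

-- heapq.heappop: pop the last element; if the heap is still nonempty, return the root,
-- put the last element at the root and _siftup; none = IndexError on the empty heap.
def pvHeappop? (heap : List (Int × Int)) :
    Option ((Int × Int) × List (Int × Int)) :=
  match heap.getLast? with
  | none => none
  | some lastelt =>
    match heap.dropLast with
    | [] => some (lastelt, [])
    | r :: t => some (r, pvSiftup ((r :: t).set 0 lastelt) lastelt)

-- the while loop of A: peek q[0] (IndexError on empty → -2, unreachable inside Pre_),
-- pop while the condition holds, else sort the remaining heap by index and index it.
def pvLoopAAux (fuel : Nat) (q : List (Int × Int)) (K previous : Int) : Int :=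
  match fuel with
  | 0 => -2                          -- fuel > q.length always (each pop shrinks q): unreachable
  | fuel + 1 =>
    match pvHeappop? q with
    | none => -2
    | some (top, q') =>
      if (top.1 - previous) * (q.length : Int) ≤ K then
        pvLoopAAux fuel q' (K - (top.1 - previous) * (q.length : Int)) top.1
      else
        match PySem.List.pyGet? (PySem.List.sorted q (fun p => p.2) false)
            (PySem.Int.mod K (q.length : Int)) with
        | none => -2
        | some p => p.2

def pvLoopA (q : List (Int × Int)) (K previous : Int) : Int :=
  pvLoopAAux (q.length + 1) q K previous

def solution (food_times : List Int) (K : Int) : Int :=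
  if food_times.sum ≤ K then -1
  else
    let q := (PySem.List.pyRange 0 (food_times.length : Int) 1).foldl
      (fun q i => pvHeappush q (PySem.List.pyGetD food_times i 0, i + 1)) []
    pvLoopA q K 0

-- ===== PORT B =====
-- prefix = [0]; for v in vs: prefix.append(prefix[-1] + v)
def pvBuildPrefix (vs : List Int) : List Int :=
  vs.foldl (fun p v => p ++ [PySem.List.pyGetD p (-1) 0 + v]) [0]

-- cost(j) = prefix[j] + (n - j) * vs[j - 1] if j > 0 else 0
-- (indices read with a default: in every call B makes they are in range inside Pre_)
def pvCost (vs pre : List Int) (n : Nat) (j : Nat) : Int :=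
  if 0 < j then
    PySem.List.pyGetD pre (j : Int) 0 + ((n : Int) - (j : Int)) * PySem.List.pyGetD vs ((j : Int) - 1) 0
  else 0

-- the while lo < hi binary-search loop (lo, hi stay ≥ 1 in every call B makes)
def pvBisect (vs pre : List Int) (n : Nat) (K : Int) (lo hi : Nat) : Nat :=
  if lo < hi then
    let mid := (lo + hi + 1) / 2
    if pvCost vs pre n mid ≤ K then pvBisect vs pre n K mid hi
    else pvBisect vs pre n K lo (mid - 1)
  else lo
termination_by hi - lo
decreasing_by all_goals omega

-- survivors = range(1, n+1) if k == 0 else [i+1 for i, t in enumerate(food_times) if t > vs[k-1]]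
def pvSurvivors (food_times vs : List Int) (n k : Nat) : List Int :=
  if k = 0 then PySem.List.pyRange 1 ((n : Int) + 1) 1
  else
    let thr := PySem.List.pyGetD vs ((k : Int) - 1) 0
    ((PySem.List.enumerate food_times 0).filter (fun it => thr < it.2)).map (fun it => it.1 + 1)

def solution_alt (food_times : List Int) (K : Int) : Int :=
  let n := food_times.length
  if food_times.sum ≤ K then -1
  else
    let vs := PySem.List.sorted food_times (fun x => x) false
    let pre := pvBuildPrefix vs
    let k := if K < pvCost vs pre n 1 then 0 else pvBisect vs pre n K 1 (n - 1)
    let K' := K - pvCost vs pre n k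
    let survivors := pvSurvivors food_times vs n k
    match PySem.List.pyGet? survivors (PySem.Int.mod K' (survivors.length : Int)) with
    | none => -3                       -- unreachable inside Pre_: survivors ≠ []
    | some x => x

-- ===== PRECONDITION & SPEC =====
-- Pre_ excludes only food_times = [] with K < 0, where Python A (and Python B) raise
-- IndexError peeking the empty queue (resp. reading vs[0]).
def Pre_solution (food_times : List Int) (K : Int) : Prop :=
  food_times ≠ [] ∨ 0 ≤ K
instance (food_times : List Int) (K : Int) : Decidable (Pre_solution food_times K) := by
  unfold Pre_solution; infer_instance

def pvWitness_solution : List Int × Int := ([3, 1, 2], 5)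

def Spec_solution (food_times : List Int) (K : Int) (out : Int) : Prop :=
  out = solution_alt food_times K
instance (food_times : List Int) (K : Int) (out : Int) :
    Decidable (Spec_solution food_times K out) := by unfold Spec_solution; infer_instance

-- ===== CLAIM (what is proved, stated in full; the proofs are below) =====
def Claim_equal_solution : Prop := ∀ (food_times : List Int) (K : Int),
  Dom_solution food_times K → Pre_solution food_times K →
    Spec_solution food_times K (solution food_times K)

-- ===== LEMMAS AND PROOFS =====

-- proof-side: the greedy walk both programs are equivalent to
def pvWalk (foods : List (Int × Int)) (K previous : Int) : Int :=
  match foods with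
  | [] => -3
  | f :: rest =>
    if (f.1 - previous) * (foods.length : Int) ≤ K then
      pvWalk rest (K - (f.1 - previous) * (foods.length : Int)) f.1
    else
      match PySem.List.pyGet? (PySem.List.sorted foods (fun p => p.2) false)
          (PySem.Int.mod K (foods.length : Int)) with
      | none => -3
      | some p => p.2

def pvPairs (food_times : List Int) : List (Int × Int) :=
  (PySem.List.enumerate food_times 0).map (fun it => (it.2, it.1 + 1))

def pvS0 (food_times : List Int) : List (Int × Int) :=
  PySem.List.sorted (pvPairs food_times) (fun p => toLex p) false

-- closed-form cost in terms of take-sums (what pvCost computes on the built prefix list)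
def pvPrev (vs : List Int) (j : Nat) : Int := if j = 0 then 0 else vs.getD (j - 1) 0
def pvC (vs : List Int) (j : Nat) : Int :=
  if j = 0 then 0 else (vs.take j).sum + ((vs.length : Int) - (j : Int)) * vs.getD (j - 1) 0

theorem pvSiftdownAux_length (fuel : Nat) :
    ∀ (heap : List (Int × Int)) (pos : Nat) (x : Int × Int),
      (pvSiftdownAux fuel heap pos x).length = heap.length := by
  induction fuel with
  | zero => intro heap pos x; simp [pvSiftdownAux]
  | succ fuel ih =>
    intro heap pos x
    simp only [pvSiftdownAux]
    split
    · split
      · rw [ih]; simp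
      · simp
    · simp

theorem pvSiftdown_length (heap : List (Int × Int)) (pos : Nat) (x : Int × Int) :
    (pvSiftdown heap pos x).length = heap.length :=
  pvSiftdownAux_length pos heap pos x

theorem pvSiftupLoopAux_length (fuel : Nat) :
    ∀ (heap : List (Int × Int)) (pos : Nat),
      (pvSiftupLoopAux fuel heap pos).1.length = heap.length := by
  induction fuel with
  | zero => intro heap pos; simp [pvSiftupLoopAux]
  | succ fuel ih =>
    intro heap pos
    simp only [pvSiftupLoopAux]
    split
    · rw [ih]; simp
    · simp

theorem pvSiftupLoop_length (heap : List (Int × Int)) (pos : Nat) :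
    (pvSiftupLoop heap pos).1.length = heap.length :=
  pvSiftupLoopAux_length heap.length heap pos

theorem pvHeappop?_length (heap : List (Int × Int)) (top : Int × Int)
    (rest : List (Int × Int)) (h : pvHeappop? heap = some (top, rest)) :
    rest.length + 1 = heap.length := by
  unfold pvHeappop? at h
  cases hl : heap.getLast? with
  | none => simp [hl] at h
  | some lastelt =>
    rw [hl] at h
    cases hd : heap.dropLast with
    | nil =>
      rw [hd] at h
      cases heap with
      | nil => simp at hl
      | cons a t =>
        simp only [Option.some.injEq, Prod.mk.injEq] at h
        have := congrArg List.length hd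
        simp at this
        simp [← h.2, this]
    | cons r t =>
      rw [hd] at h
      simp only [Option.some.injEq, Prod.mk.injEq] at h
      have hlen : heap.dropLast.length = heap.length - 1 := by simp
      rw [hd] at hlen
      have hne : heap ≠ [] := by intro hh; simp [hh] at hl
      have : 0 < heap.length := List.length_pos_iff.mpr hne
      rw [← h.2]
      simp only [pvSiftup]
      rw [pvSiftdown_length, pvSiftupLoop_length]
      simp only [List.length_set]
      simp at hlen
      simp [hlen]
      omega

theorem set_set_perm (l : List (Int × Int)) (i j : Nat) (a b : Int × Int)
    (hi : i < l.length) (hj : j < l.length) (hij : i ≠ j) :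
    ((l.set i a).set j b).Perm ((l.set i b).set j a) := by
  have key : ∀ (i j : Nat) (a b : Int × Int), i < j → j < l.length →
      ((l.set i a).set j b).Perm ((l.set i b).set j a) := by
    intro i j a b hlt hj
    have h1 : ((l.set i a).set j b).Perm (b :: (l.set i a).eraseIdx j) :=
      List.set_perm_cons_eraseIdx (by simpa using hj) b
    have h2 : ((l.set i b).set j a).Perm (a :: (l.set i b).eraseIdx j) :=
      List.set_perm_cons_eraseIdx (by simpa using hj) a
    rw [List.eraseIdx_set_gt hlt] at h1 h2
    have hi' : i < (l.eraseIdx j).length := by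
      rw [List.length_eraseIdx_of_lt hj]; omega
    have h3 : ((l.eraseIdx j).set i a).Perm (a :: (l.eraseIdx j).eraseIdx i) :=
      List.set_perm_cons_eraseIdx hi' a
    have h4 : ((l.eraseIdx j).set i b).Perm (b :: (l.eraseIdx j).eraseIdx i) :=
      List.set_perm_cons_eraseIdx hi' b
    exact h1.trans ((h3.cons b).trans ((List.Perm.swap a b _).trans
      (((h4.cons a).symm).trans h2.symm)))
  rcases Nat.lt_or_ge i j with hlt | hge
  · exact key i j a b hlt hj
  · have hlt : j < i := by omega
    rw [List.set_comm a b hij, List.set_comm b a hij]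
    exact key j i b a hlt hi

def pvHeapLe (a b : Int × Int) : Prop := toLex a ≤ toLex b
def IsHeap (l : List (Int × Int)) : Prop :=
  ∀ j : Nat, 0 < j → j < l.length → pvHeapLe (l.getD ((j - 1) / 2) (0, 0)) (l.getD j (0, 0))

theorem isHeap_root_min (l : List (Int × Int)) (h : IsHeap l) :
    ∀ j : Nat, j < l.length → pvHeapLe (l.getD 0 (0, 0)) (l.getD j (0, 0)) := by
  intro j
  induction j using Nat.strong_induction_on with
  | _ j ih =>
    intro hj
    rcases Nat.eq_zero_or_pos j with h0 | h0
    · subst h0; exact le_refl _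
    · exact le_trans (ih ((j - 1) / 2) (by omega) (by omega)) (h j h0 hj)

theorem isHeap_root_le_mem (l : List (Int × Int)) (h : IsHeap l) (y : Int × Int)
    (hy : y ∈ l) : pvHeapLe (l.getD 0 (0, 0)) y := by
  obtain ⟨i, hi, rfl⟩ := List.getElem_of_mem hy
  have := isHeap_root_min l h i hi
  rwa [List.getD_eq_getElem l (0,0) hi] at this
def HeapExcept (l : List (Int × Int)) (pos : Nat) : Prop :=
  ∀ j : Nat, 0 < j → j < l.length → j ≠ pos →
    pvHeapLe (l.getD ((j - 1) / 2) (0, 0)) (l.getD j (0, 0))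

theorem gd_set_eq (l : List (Int × Int)) (i : Nat) (v : Int × Int) (h : i < l.length) :
    (l.set i v).getD i (0, 0) = v := by
  simp [List.getD, h]

theorem gd_set_ne (l : List (Int × Int)) (i j : Nat) (v : Int × Int) (h : i ≠ j) :
    (l.set i v).getD j (0, 0) = l.getD j (0, 0) := by
  simp [List.getD, List.getElem?_set_ne h]

theorem pvSiftdownAux_spec (fuel : Nat) (l : List (Int × Int)) (pos : Nat) (x : Int × Int) :
    pos ≤ fuel → pos < l.length → HeapExcept l pos →
    (∀ j : Nat, 0 < j → j < l.length → (j - 1) / 2 = pos →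
      pvHeapLe x (l.getD j (0, 0)) ∧
      (0 < pos → pvHeapLe (l.getD ((pos - 1) / 2) (0, 0)) (l.getD j (0, 0)))) →
    IsHeap (pvSiftdownAux fuel l pos x) ∧ (pvSiftdownAux fuel l pos x).Perm (l.set pos x) := by
  fun_induction pvSiftdownAux fuel l pos x with
  | case1 l pos =>
    intro hfuel hp hA hB
    have hpos0 : pos = 0 := by omega
    subst hpos0
    refine ⟨?_, List.Perm.refl _⟩
    intro j hj0 hjlen
    rw [List.length_set] at hjlen
    have hjpos : j ≠ 0 := by omega
    rw [gd_set_ne l 0 j x (Ne.symm hjpos)]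
    by_cases hpar : (j - 1) / 2 = 0
    · rw [hpar, gd_set_eq l 0 x hp]
      exact (hB j hj0 hjlen hpar).1
    · rw [gd_set_ne l 0 _ x (Ne.symm hpar)]
      exact hA j hj0 hjlen hjpos
  | case2 l pos fuel hpos parentpos parent hlt ih =>
    intro hfuel hp hA hB
    have hlt' : toLex x < toLex parent := by
      simpa [pvLt] using hlt
    have hpp : parentpos < pos := by
      simp only [parentpos]; omega
    have hpplen : parentpos < l.length := lt_trans hpp hp
    have hppne : pos ≠ parentpos := by omega
    have hparent : parent = l.getD parentpos (0,0) := rfl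
    have hA' : HeapExcept (l.set pos parent) parentpos := by
      intro j hj0 hjlen hjpp
      rw [List.length_set] at hjlen
      by_cases hjpos : j = pos
      · rw [hjpos, gd_set_ne l pos _ parent (by omega : pos ≠ (pos - 1) / 2),
          gd_set_eq l pos parent hp]
        exact le_refl _
      · rw [gd_set_ne l pos j parent (Ne.symm (by omega) : pos ≠ j)]
        by_cases hpar : (j - 1) / 2 = pos
        · rw [hpar, gd_set_eq l pos parent hp]
          exact (hB j hj0 hjlen hpar).2 hpos
        · rw [gd_set_ne l pos _ parent (Ne.symm hpar)]
          exact hA j hj0 hjlen hjpos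
    have hB' : ∀ j : Nat, 0 < j → j < (l.set pos parent).length → (j - 1) / 2 = parentpos →
        pvHeapLe x ((l.set pos parent).getD j (0,0)) ∧
        (0 < parentpos → pvHeapLe ((l.set pos parent).getD ((parentpos - 1) / 2) (0,0))
          ((l.set pos parent).getD j (0,0))) := by
      intro j hj0 hjlen hjpar
      rw [List.length_set] at hjlen
      by_cases hjpos : j = pos
      · rw [hjpos, gd_set_eq l pos parent hp]
        constructor
        · exact le_of_lt hlt'
        · intro hpp0
          rw [gd_set_ne l pos _ parent (by omega : pos ≠ (parentpos - 1) / 2)]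
          exact hA parentpos hpp0 hpplen (by omega)
      · rw [gd_set_ne l pos j parent (Ne.symm hjpos)]
        have hAj := hA j hj0 hjlen hjpos
        rw [hjpar] at hAj
        constructor
        · exact le_trans (le_of_lt hlt') hAj
        · intro hpp0
          rw [gd_set_ne l pos _ parent (by omega : pos ≠ (parentpos - 1) / 2)]
          exact le_trans (hA parentpos hpp0 hpplen (by omega)) hAj
    obtain ⟨ihH, ihP⟩ := ih (by omega) (by simpa using hpplen) hA' hB'
    refine ⟨ihH, ihP.trans ?_⟩
    have hperm := set_set_perm l pos parentpos parent x hp hpplen (by omega)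
    refine hperm.trans ?_
    have : parent = (l.set pos x)[parentpos]'(by simpa using hpplen) := by
      rw [hparent, List.getD_eq_getElem l (0,0) hpplen]
      rw [List.getElem_set_ne (by omega)]
    rw [this, List.set_getElem_self]
  | case3 l pos fuel hpos parentpos parent hlt =>
    intro hfuel hp hA hB
    have hge : toLex parent ≤ toLex x := by
      simp only [pvLt] at hlt
      exact not_lt.mp (by simpa using hlt)
    refine ⟨?_, List.Perm.refl _⟩
    intro j hj0 hjlen
    rw [List.length_set] at hjlen
    by_cases hjpos : j = pos
    · rw [hjpos, gd_set_eq l pos x hp, gd_set_ne l pos _ x (by omega : pos ≠ (pos-1)/2)]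
      exact hge
    · rw [gd_set_ne l pos j x (Ne.symm hjpos)]
      by_cases hpar : (j - 1) / 2 = pos
      · rw [hpar, gd_set_eq l pos x hp]
        exact (hB j hj0 hjlen hpar).1
      · rw [gd_set_ne l pos _ x (Ne.symm hpar)]
        exact hA j hj0 hjlen hjpos
  | case4 l pos fuel hpos =>
    intro hfuel hp hA hB
    have hpos0 : pos = 0 := by omega
    subst hpos0
    refine ⟨?_, List.Perm.refl _⟩
    intro j hj0 hjlen
    rw [List.length_set] at hjlen
    have hjpos : j ≠ 0 := by omega
    rw [gd_set_ne l 0 j x (Ne.symm hjpos)]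
    by_cases hpar : (j - 1) / 2 = 0
    · rw [hpar, gd_set_eq l 0 x hp]
      exact (hB j hj0 hjlen hpar).1
    · rw [gd_set_ne l 0 _ x (Ne.symm hpar)]
      exact hA j hj0 hjlen hjpos

theorem pvSiftdown_spec (l : List (Int × Int)) (pos : Nat) (x : Int × Int) :
    pos < l.length → HeapExcept l pos →
    (∀ j : Nat, 0 < j → j < l.length → (j - 1) / 2 = pos →
      pvHeapLe x (l.getD j (0, 0)) ∧
      (0 < pos → pvHeapLe (l.getD ((pos - 1) / 2) (0, 0)) (l.getD j (0, 0)))) →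
    IsHeap (pvSiftdown l pos x) ∧ (pvSiftdown l pos x).Perm (l.set pos x) :=
  pvSiftdownAux_spec pos l pos x (le_refl pos)

def HEC (l : List (Int × Int)) (pos : Nat) : Prop :=
  ∀ j : Nat, 0 < j → j < l.length → (j - 1) / 2 ≠ pos →
    pvHeapLe (l.getD ((j - 1) / 2) (0, 0)) (l.getD j (0, 0))

theorem pvSiftupLoopAux_spec (fuel : Nat) (l : List (Int × Int)) (pos : Nat) :
    l.length ≤ fuel + pos → pos < l.length → HEC l pos →
    (0 < pos → ∀ j : Nat, 0 < j → j < l.length → (j - 1) / 2 = pos →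
      pvHeapLe (l.getD ((pos - 1) / 2) (0, 0)) (l.getD j (0, 0))) →
    (pvSiftupLoopAux fuel l pos).1.length = l.length ∧
    (pvSiftupLoopAux fuel l pos).2 < l.length ∧
    l.length ≤ 2 * (pvSiftupLoopAux fuel l pos).2 + 1 ∧
    (∀ y, ((pvSiftupLoopAux fuel l pos).1.set (pvSiftupLoopAux fuel l pos).2 y).Perm
      (l.set pos y)) ∧
    HeapExcept (pvSiftupLoopAux fuel l pos).1 (pvSiftupLoopAux fuel l pos).2 := by
  fun_induction pvSiftupLoopAux fuel l pos with
  | case1 l pos =>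
    intro hfuel hp h1 h2
    omega
  | case2 l pos fuel endpos childpos hlt rightpos c ih =>
    intro hfuel hp h1 h2
    have hend : endpos = l.length := rfl
    have hcp : childpos = 2 * pos + 1 := rfl
    have hrp : rightpos = childpos + 1 := rfl
    have hcor : c = rightpos ∨ c = childpos := by
      simp only [c]; split
      · exact Or.inl rfl
      · exact Or.inr rfl
    have hc_lt : c < l.length := by
      simp only [c]; split
      · omega
      · omega
    have hc_gt : pos < c := by omega
    have hmin : ∀ j : Nat, 0 < j → j < l.length → (j - 1) / 2 = pos →
        pvHeapLe (l.getD c (0, 0)) (l.getD j (0, 0)) := by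
      intro j hj0 hjlen hjpar
      have hj : j = childpos ∨ j = rightpos := by omega
      simp only [c]
      split
      · next hcond =>
        have hle : toLex (l.getD rightpos (0,0)) ≤ toLex (l.getD childpos (0,0)) := by
          have := hcond.2
          simp only [pvLt] at this
          exact not_lt.mp (by simpa using this)
        rcases hj with rfl | rfl
        · exact hle
        · exact le_refl _
      · next hcond =>
        rcases hj with rfl | rfl
        · exact le_refl _
        · rw [Classical.not_and_iff_not_or_not] at hcond
          rcases hcond with hbad | hlt2
          · omega
          · have : toLex (l.getD childpos (0,0)) < toLex (l.getD rightpos (0,0)) := by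
              simp only [pvLt] at hlt2
              simpa using Classical.not_not.mp hlt2
            exact le_of_lt this
    have hcpar : (c - 1) / 2 = pos := by omega
    have hcne : pos ≠ c := by omega
    have hA' : HEC (l.set pos (l.getD c (0,0))) c := by
      intro j hj0 hjlen hjne
      rw [List.length_set] at hjlen
      by_cases hjpos : j = pos
      · rw [hjpos, gd_set_ne l pos _ _ (by omega : pos ≠ (pos - 1) / 2),
          gd_set_eq l pos _ hp]
        exact h2 (by omega) c (by omega) hc_lt hcpar
      · rw [gd_set_ne l pos j _ (Ne.symm hjpos)]
        by_cases hpar : (j - 1) / 2 = pos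
        · rw [hpar, gd_set_eq l pos _ hp]
          exact hmin j hj0 hjlen hpar
        · rw [gd_set_ne l pos _ _ (Ne.symm hpar)]
          exact h1 j hj0 hjlen (by omega)
    have h2' : 0 < c → ∀ j : Nat, 0 < j → j < (l.set pos (l.getD c (0,0))).length →
        (j - 1) / 2 = c →
        pvHeapLe ((l.set pos (l.getD c (0,0))).getD ((c - 1) / 2) (0, 0))
          ((l.set pos (l.getD c (0,0))).getD j (0, 0)) := by
      intro _ j hj0 hjlen hjpar
      rw [List.length_set] at hjlen
      rw [hcpar, gd_set_eq l pos _ hp, gd_set_ne l pos j _ (by omega : pos ≠ j)]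
      have := h1 j hj0 hjlen (by omega)
      rwa [hjpar] at this
    obtain ⟨ihL, ih2, ih3, ihP, ihH⟩ := ih (by simp; omega) (by simpa using hc_lt) hA' h2'
    rw [List.length_set] at ihL ih2 ih3
    refine ⟨ihL, ih2, ih3, ?_, ihH⟩
    intro y
    refine (ihP y).trans ?_
    have hperm := set_set_perm l pos c (l.getD c (0,0)) y hp hc_lt hcne
    refine hperm.trans ?_
    have : l.getD c (0,0) = (l.set pos y)[c]'(by simpa using hc_lt) := by
      rw [List.getD_eq_getElem l (0,0) hc_lt, List.getElem_set_ne (by omega)]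
    rw [this, List.set_getElem_self]
  | case3 l pos fuel endpos childpos hge =>
    intro hfuel hp h1 h2
    have hed : endpos = l.length := rfl
    have hcd : childpos = 2 * pos + 1 := rfl
    refine ⟨rfl, hp, by omega, fun y => List.Perm.refl _, ?_⟩
    intro j hj0 hjlen hjne
    have hjlen' : j < l.length := hjlen
    by_cases hpar : (j - 1) / 2 = pos
    · omega
    · exact h1 j hj0 hjlen' hpar

theorem pvSiftupLoop_spec (l : List (Int × Int)) (pos : Nat) :
    pos < l.length → HEC l pos →
    (0 < pos → ∀ j : Nat, 0 < j → j < l.length → (j - 1) / 2 = pos →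
      pvHeapLe (l.getD ((pos - 1) / 2) (0, 0)) (l.getD j (0, 0))) →
    (pvSiftupLoop l pos).1.length = l.length ∧ (pvSiftupLoop l pos).2 < l.length ∧
    l.length ≤ 2 * (pvSiftupLoop l pos).2 + 1 ∧
    (∀ y, ((pvSiftupLoop l pos).1.set (pvSiftupLoop l pos).2 y).Perm (l.set pos y)) ∧
    HeapExcept (pvSiftupLoop l pos).1 (pvSiftupLoop l pos).2 :=
  pvSiftupLoopAux_spec l.length l pos (by omega)

theorem pvSiftup_spec (m : List (Int × Int)) (x : Int × Int) (h0 : 0 < m.length)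
    (h1 : HEC m 0) : IsHeap (pvSiftup m x) ∧ (pvSiftup m x).Perm (m.set 0 x) := by
  obtain ⟨L, P2, P3, Pperm, PH⟩ := pvSiftupLoop_spec m 0 h0 h1
    (fun h => absurd h (lt_irrefl 0))
  have heq : pvSiftup m x = pvSiftdown (pvSiftupLoop m 0).1 (pvSiftupLoop m 0).2 x := by
    rw [pvSiftup]
  rw [heq]
  obtain ⟨hH, hP⟩ := pvSiftdown_spec (pvSiftupLoop m 0).1 (pvSiftupLoop m 0).2 x
    (by omega) PH (by intro j hj0 hjlen hjpar; rw [L] at hjlen; omega)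
  exact ⟨hH, hP.trans (Pperm x)⟩

theorem pvHeappush_spec (l : List (Int × Int)) (x : Int × Int) (h : IsHeap l) :
    IsHeap (pvHeappush l x) ∧ (pvHeappush l x).Perm (l ++ [x]) := by
  have hgd : ∀ j : Nat, j < l.length → (l ++ [x]).getD j (0,0) = l.getD j (0,0) := by
    intro j hj
    simp [List.getD, List.getElem?_append_left hj]
  obtain ⟨hH, hP⟩ := pvSiftdown_spec (l ++ [x]) l.length x (by simp)
    (by
      intro j hj0 hjlen hjne
      simp only [List.length_append, List.length_cons, List.length_nil] at hjlen
      have hj : j < l.length := by omega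
      rw [hgd j hj, hgd ((j-1)/2) (by omega)]
      exact h j hj0 hj)
    (by
      intro j hj0 hjlen hjpar
      simp only [List.length_append, List.length_cons, List.length_nil] at hjlen
      omega)
  refine ⟨hH, hP.trans ?_⟩
  have hx : (l ++ [x])[l.length]'(by simp) = x := by
    simp
  rw [show (l ++ [x]).set l.length x
      = (l ++ [x]).set l.length ((l ++ [x])[l.length]'(by simp)) by rw [hx],
    List.set_getElem_self]

theorem isHeap_nil : IsHeap [] := by
  intro j hj0 hjlen
  simp at hjlen

theorem pvHeappop?_spec (q : List (Int × Int)) (r : Int × Int) (t : List (Int × Int))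
    (hq : q = r :: t) (h : IsHeap q) :
    ∃ q', pvHeappop? q = some (r, q') ∧ q'.Perm t ∧ IsHeap q' := by
  subst hq
  cases t with
  | nil =>
    exact ⟨[], rfl, List.Perm.refl _, isHeap_nil⟩
  | cons a t' =>
    have hne : (a :: t') ≠ [] := by simp
    have hlast : (r :: a :: t').getLast? = some ((a :: t').getLast hne) := by
      rw [List.getLast?_eq_some_getLast (by simp : (r :: a :: t') ≠ [])]
      exact congrArg some (List.getLast_cons hne)
    set last := (a :: t').getLast hne with hlastdef
    have hstep : pvHeappop? (r :: a :: t')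
        = some (r, pvSiftup ((r :: (a :: t').dropLast).set 0 last) last) := by
      rw [pvHeappop?, hlast]
      rfl
    have hset : ((r :: (a :: t').dropLast).set 0 last) = last :: (a :: t').dropLast := rfl
    have hmlen : (last :: (a :: t').dropLast).length = (a :: t').length := by
      simp
    have hgdm : ∀ i : Nat, 0 < i → i < (a :: t').length →
        (last :: (a :: t').dropLast).getD i (0,0) = (r :: a :: t').getD i (0,0) := by
      intro i hi0 hilen
      obtain ⟨i0, rfl⟩ : ∃ i0, i = i0 + 1 := ⟨i - 1, by omega⟩
      have h1 : (last :: (a :: t').dropLast).getD (i0+1) (0,0)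
          = (a :: t').dropLast.getD i0 (0,0) := by simp [List.getD]
      have hi0' : i0 < (a :: t').dropLast.length := by
        simp only [List.length_dropLast]
        simp at hilen ⊢
        omega
      rw [h1, List.getD_eq_getElem _ _ hi0', List.getElem_dropLast,
        List.getD_eq_getElem _ _ (by simp at hilen ⊢; omega)]
      simp
    have hHEC : HEC (last :: (a :: t').dropLast) 0 := by
      intro j hj0 hjlen hjne
      have hjlen' : j < (a :: t').length := by
        rw [hmlen] at hjlen; exact hjlen
      rw [hgdm j hj0 hjlen', hgdm ((j-1)/2) (by omega) (by omega)]
      exact h j hj0 (by simp at hjlen' ⊢; omega)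
    obtain ⟨hH, hP⟩ := pvSiftup_spec (last :: (a :: t').dropLast) last (by simp) hHEC
    refine ⟨_, hstep.trans (by rw [hset]), ?_, hH⟩
    refine hP.trans ?_
    rw [List.set_cons_zero]
    have hsplit : (a :: t').dropLast ++ [last] = a :: t' :=
      List.dropLast_append_getLast hne
    conv_rhs => rw [← hsplit]
    exact List.perm_append_comm (l₁ := [last])
theorem foldl_push_spec (ps : List (Int × Int)) :
    ∀ l, IsHeap l → IsHeap (ps.foldl pvHeappush l) ∧ (ps.foldl pvHeappush l).Perm (l ++ ps) := by
  induction ps with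
  | nil => exact fun l hl => ⟨hl, by simp⟩
  | cons p ps ih =>
    intro l hl
    obtain ⟨h1, h2⟩ := pvHeappush_spec l p hl
    obtain ⟨h3, h4⟩ := ih (pvHeappush l p) h1
    refine ⟨h3, ?_⟩
    simp only [List.foldl_cons]
    refine h4.trans ?_
    have := h2.append_right ps
    simpa using this

theorem sorted_snd_eq (q s : List (Int × Int)) (hperm : q.Perm s)
    (hnd : (s.map Prod.snd).Nodup) :
    PySem.List.sorted q (fun p => p.2) false = PySem.List.sorted s (fun p => p.2) false := by
  have hsp := PySem.List.sorted_perm s (fun p : Int × Int => p.2) false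
  have h1 : (PySem.List.sorted s (fun p : Int × Int => p.2) false).Perm q :=
    hsp.trans hperm.symm
  have hpw := PySem.List.sorted_pairwise s (fun p : Int × Int => p.2)
  have hnd' : ((PySem.List.sorted s (fun p : Int × Int => p.2) false).map Prod.snd).Nodup :=
    ((hsp.map Prod.snd).symm).nodup hnd
  have hne := List.pairwise_map.mp hnd'
  have hlt : (PySem.List.sorted s (fun p : Int × Int => p.2) false).Pairwise
      (fun a b => a.2 < b.2) :=
    (hpw.and hne).imp (fun h => lt_of_le_of_ne h.1 h.2)
  exact PySem.List.sorted_eq_of_perm_of_pairwise_lt q _ (fun p => p.2) h1 hlt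

theorem loop_eq : ∀ (s : List (Int × Int)) (fuel : Nat) (q : List (Int × Int))
    (K prev : Int), q.length < fuel →
    IsHeap q → q.Perm s → s.Pairwise (fun a b => pvHeapLe a b) →
    (s.map Prod.snd).Nodup →
    K < (s.map Prod.fst).sum - prev * s.length →
    (0 ≤ K ∨ s ≠ []) →
    pvLoopAAux fuel q K prev = pvWalk s K prev := by
  intro s
  induction s with
  | nil =>
    intro fuel q K prev _ _ _ _ _ hinv hstart
    exfalso
    simp at hinv
    rcases hstart with h | h
    · omega
    · exact h rfl
  | cons f rest ih =>
    intro fuel q K prev hfuel hheap hperm hsorted hnd hinv hstart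
    obtain ⟨fuel, rfl⟩ : ∃ fuel', fuel = fuel' + 1 := ⟨fuel - 1, by omega⟩
    cases hq : q with
    | nil => subst hq; exact absurd (hperm.symm.length_eq) (by simp)
    | cons r t =>
      subst hq
      obtain ⟨q', hpop, hq'perm, hq'heap⟩ := pvHeappop?_spec (r :: t) r t rfl hheap
      have hf_mem : f ∈ r :: t := hperm.symm.subset (List.mem_cons_self)
      have h1 : pvHeapLe r f := by
        have := isHeap_root_le_mem (r :: t) hheap f hf_mem
        simpa [List.getD] using this
      have h2 : pvHeapLe f r := by
        have hr_mem : r ∈ f :: rest := hperm.subset (List.mem_cons_self)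
        rcases List.mem_cons.mp hr_mem with rfl | hr
        · exact le_refl _
        · exact List.rel_of_pairwise_cons hsorted hr
      have hfr : f = r := by
        have : toLex f = toLex r := le_antisymm h2 h1
        exact toLex.injective this
      subst hfr
      have hlen : (((f :: t).length : Nat) : Int) = (((f :: rest).length : Nat) : Int) := by
        rw [hperm.length_eq]
      rw [pvLoopAAux, hpop]
      rw [pvWalk]
      simp only [hlen]
      by_cases hcond : ((f.1 - prev) * (((f :: rest).length : Nat) : Int) ≤ K)
      · rw [if_pos hcond, if_pos hcond]
        have htr : t.Perm rest := hperm.cons_inv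
        have hinv' : K - (f.1 - prev) * (((f :: rest).length : Nat) : Int)
            < (rest.map Prod.fst).sum - f.1 * rest.length := by
          simp only [List.map_cons, List.sum_cons, List.length_cons] at hinv ⊢
          push_cast at hinv ⊢
          have hident : (f.1 - prev) * ((rest.length : Int) + 1)
              = f.1 * rest.length + f.1 - prev * rest.length - prev := by ring
          rw [hident]
          linarith
        have hq'len : q'.length < fuel := by
          have := pvHeappop?_length (f :: t) f q' hpop
          simp at hfuel this
          omega
        exact ih fuel q' _ f.1 hq'len hq'heap (hq'perm.trans htr)
          (List.Pairwise.of_cons hsorted)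
          ((List.nodup_cons.mp (by simpa using hnd)).2)
          hinv' (Or.inl (by omega))
      · rw [if_neg hcond, if_neg hcond]
        rw [sorted_snd_eq (f :: t) (f :: rest) hperm hnd]
        have hlen0 : (0:Int) < (((f :: rest).length : Nat) : Int) := by
          simp
        have h0 := PySem.Int.mod_nonneg K hlen0
        have hltl := PySem.Int.mod_lt K hlen0
        have hget : ∃ p, PySem.List.pyGet?
            (PySem.List.sorted (f :: rest) (fun p => p.2) false)
            (PySem.Int.mod K (((f :: rest).length : Nat) : Int)) = some p := by
          rw [PySem.List.pyGet?_of_nonneg _ h0]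
          rw [List.getElem?_eq_getElem
            (by rw [PySem.List.length_sorted]; omega)]
          exact ⟨_, rfl⟩
        obtain ⟨p, hp⟩ := hget
        rw [hp]

-- A equals the greedy walk over the lex-sorted pair list
theorem solution_walk (food_times : List Int) (K : Int)
    (hpre : food_times ≠ [] ∨ 0 ≤ K) (hs : ¬ food_times.sum ≤ K) :
    solution food_times K = pvWalk (pvS0 food_times) K 0 := by
  rw [solution, if_neg hs]
  have hfold : (PySem.List.pyRange 0 (food_times.length : Int) 1).foldl
      (fun q i => pvHeappush q (PySem.List.pyGetD food_times i 0, i + 1)) []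
      = (pvPairs food_times).foldl pvHeappush [] := by
    rw [pvPairs, PySem.List.enumerate_eq_map_pyRange food_times 0, List.map_map, List.foldl_map]
    rfl
  show pvLoopA _ K 0 = _
  rw [hfold]
  obtain ⟨hq0heap, hq0perm⟩ := foldl_push_spec (pvPairs food_times) [] isHeap_nil
  have hs0perm : ((pvPairs food_times).foldl pvHeappush []).Perm (pvS0 food_times) := by
    refine hq0perm.trans ?_
    simpa using (PySem.List.sorted_perm (pvPairs food_times)
      (fun p : Int × Int => toLex p) false).symm
  have hsorted : (pvS0 food_times).Pairwise (fun a b => pvHeapLe a b) :=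
    PySem.List.sorted_pairwise (pvPairs food_times) (fun p : Int × Int => toLex p)
  have hndpairs : ((pvPairs food_times).map Prod.snd).Nodup := by
    rw [pvPairs, List.map_map]
    have h1 := PySem.List.pairwise_lt_enumerate food_times 0
    have h2 : List.Pairwise (fun a b : Int × Int => a.1 + 1 ≠ b.1 + 1)
        (PySem.List.enumerate food_times 0) :=
      h1.imp (fun h => by omega)
    exact List.pairwise_map.mpr h2
  have hnd : ((pvS0 food_times).map Prod.snd).Nodup := by
    have := (PySem.List.sorted_perm (pvPairs food_times)
      (fun p : Int × Int => toLex p) false).map Prod.snd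
    exact this.symm.nodup hndpairs
  have hsum : ((pvS0 food_times).map Prod.fst).sum = food_times.sum := by
    have h1 := ((PySem.List.sorted_perm (pvPairs food_times)
      (fun p : Int × Int => toLex p) false).map Prod.fst).sum_eq
    rw [pvS0, h1, pvPairs, List.map_map]
    rw [show (Prod.fst ∘ fun it : Int × Int => (it.2, it.1 + 1))
      = (fun x : Int × Int => x.2) from rfl]
    rw [PySem.List.map_snd_enumerate]
  have hinv : K < ((pvS0 food_times).map Prod.fst).sum - 0 * (pvS0 food_times).length := by
    rw [hsum]
    simp
    omega
  have hstart : 0 ≤ K ∨ pvS0 food_times ≠ [] := by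
    rcases hpre with hft | hk
    · right
      rw [pvS0, Ne, PySem.List.sorted_eq_nil_iff]
      intro hnil
      rw [pvPairs] at hnil
      simp at hnil
      apply hft
      have := congrArg List.length hnil
      simpa [PySem.List.length_enumerate] using this
    · exact Or.inl hk
  rw [pvLoopA]
  exact loop_eq (pvS0 food_times) (((pvPairs food_times).foldl pvHeappush []).length + 1)
    ((pvPairs food_times).foldl pvHeappush []) K 0 (by omega) hq0heap hs0perm hsorted hnd
    hinv hstart

-- ===== B-side characterization =====

theorem buildPrefix_eq (vs : List Int) :
    pvBuildPrefix vs = (List.range (vs.length + 1)).map (fun j => (vs.take j).sum) := by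
  induction vs using List.reverseRecOn with
  | nil => simp [pvBuildPrefix]
  | append_singleton vs v ih =>
    have h1 : pvBuildPrefix (vs ++ [v])
        = pvBuildPrefix vs ++ [PySem.List.pyGetD (pvBuildPrefix vs) (-1) 0 + v] := by
      rw [pvBuildPrefix, pvBuildPrefix, List.foldl_append]
      simp only [List.foldl_cons, List.foldl_nil]
    have hsplit : (List.range (vs.length + 1)).map (fun j => (vs.take j).sum)
        = (List.range vs.length).map (fun j => (vs.take j).sum) ++ [vs.sum] := by
      rw [List.range_succ, List.map_append]
      simp
    have hlast : PySem.List.pyGetD (pvBuildPrefix vs) (-1) 0 = vs.sum := by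
      rw [ih, hsplit]
      exact PySem.List.pyGetD_neg_one_append_singleton _ _ _
    rw [h1, hlast, ih]
    have hlen : (vs ++ [v]).length + 1 = (vs.length + 1) + 1 := by simp
    rw [hlen]
    conv_rhs => rw [List.range_succ, List.map_append]
    congr 1
    · apply List.map_congr_left
      intro j hj
      rw [List.mem_range] at hj
      rw [List.take_append_of_le_length (by omega)]
    · have htk : (vs ++ [v]).take (vs.length + 1) = vs ++ [v] :=
        List.take_of_length_le (by simp)
      simp [htk]

theorem prefix_getD (vs : List Int) (j : Nat) (hj : j ≤ vs.length) :
    (pvBuildPrefix vs).getD j 0 = (vs.take j).sum := by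
  rw [buildPrefix_eq]
  rw [List.getD_eq_getElem?_getD, List.getElem?_map,
    List.getElem?_range (by omega : j < vs.length + 1)]
  rfl

theorem cost_eq (vs : List Int) (j : Nat) (hj : j ≤ vs.length) :
    pvCost vs (pvBuildPrefix vs) vs.length j = pvC vs j := by
  rcases Nat.eq_zero_or_pos j with h0 | h0
  · subst h0; rfl
  · rw [pvCost, if_pos h0, pvC, if_neg (by omega)]
    have hc : ((j : Int) - 1) = (((j - 1 : Nat) : Nat) : Int) := by omega
    rw [hc, PySem.List.pyGetD_natCast, PySem.List.pyGetD_natCast, prefix_getD vs j hj]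

theorem pvC_succ (vs : List Int) (j : Nat) (hj : j < vs.length) :
    pvC vs (j + 1) = pvC vs j + (vs.getD j 0 - pvPrev vs j) * ((vs.length : Int) - (j : Int)) := by
  have htake : (vs.take (j + 1)).sum = (vs.take j).sum + vs.getD j 0 := by
    rw [List.sum_take_succ _ _ hj, List.getD_eq_getElem _ _ hj]
  rcases Nat.eq_zero_or_pos j with h0 | h0
  · subst h0
    rw [pvC, if_neg (by omega), pvC, if_pos rfl, pvPrev, if_pos rfl, htake]
    simp
    ring
  · rw [pvC, if_neg (by omega), pvC, if_neg (by omega), pvPrev, if_neg (by omega), htake]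
    have h1 : j + 1 - 1 = j := by omega
    rw [h1]
    push_cast
    ring

theorem pvC_mono (vs : List Int)
    (hsort : vs.Pairwise (fun a b => a ≤ b)) :
    ∀ i j : Nat, 1 ≤ i → i ≤ j → j ≤ vs.length → pvC vs i ≤ pvC vs j := by
  intro i j hi hij hj
  induction j with
  | zero => omega
  | succ j ihj =>
    rcases Nat.lt_or_ge j i with hlt | hge
    · have : i = j + 1 := by omega
      subst this
      exact le_refl _
    · have hjlen : j < vs.length := by omega
      refine le_trans (ihj hge (by omega)) ?_
      rw [pvC_succ vs j hjlen]
      have hj1 : 1 ≤ j := by omega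
      have hprev : pvPrev vs j ≤ vs.getD j 0 := by
        rw [pvPrev, if_neg (by omega)]
        rw [List.getD_eq_getElem _ _ hjlen, List.getD_eq_getElem _ _ (by omega : j - 1 < vs.length)]
        have := List.pairwise_iff_getElem.mp hsort (j - 1) j (by omega) hjlen (by omega)
        exact this
      have hlen : (0 : Int) ≤ (vs.length : Int) - (j : Int) := by
        omega
      nlinarith

theorem pvC_length (vs : List Int) (h : vs ≠ []) : pvC vs vs.length = vs.sum := by
  rw [pvC, if_neg (by simpa using List.length_pos_iff.mpr h |>.ne')]
  simp

theorem bisect_spec (vs : List Int) (n : Nat) (K : Int)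
    (hn : n = vs.length) :
    ∀ lo hi : Nat, 1 ≤ lo → lo ≤ hi → hi ≤ n - 1 → 1 ≤ n →
      pvC vs lo ≤ K → K < pvC vs (hi + 1) →
      lo ≤ pvBisect vs (pvBuildPrefix vs) n K lo hi ∧
      pvBisect vs (pvBuildPrefix vs) n K lo hi ≤ hi ∧
      pvC vs (pvBisect vs (pvBuildPrefix vs) n K lo hi) ≤ K ∧
      K < pvC vs (pvBisect vs (pvBuildPrefix vs) n K lo hi + 1) := by
  subst hn
  intro lo hi
  fun_induction pvBisect vs (pvBuildPrefix vs) vs.length K lo hi with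
  | case1 lo hi hlohi mid hmid ih =>
    intro h1 h2 h3 h4 h5 h6
    have hmideq : mid = (lo + hi + 1) / 2 := rfl
    have hmlo : lo < mid := by omega
    have hmhi : mid ≤ hi := by omega
    rw [cost_eq vs mid (by omega)] at hmid
    obtain ⟨c1, c2, c3, c4⟩ := ih (by omega) hmhi h3 h4 hmid h6
    exact ⟨by omega, c2, c3, c4⟩
  | case2 lo hi hlohi mid hmid ih =>
    intro h1 h2 h3 h4 h5 h6
    have hmideq : mid = (lo + hi + 1) / 2 := rfl
    have hmlo : lo < mid := by omega
    have hmhi : mid ≤ hi := by omega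
    rw [cost_eq vs mid (by omega)] at hmid
    have hKmid : K < pvC vs mid := by omega
    have hm1 : mid - 1 + 1 = mid := by omega
    obtain ⟨c1, c2, c3, c4⟩ := ih h1 (by omega) (by omega) h4 h5 (by rw [hm1]; exact hKmid)
    exact ⟨c1, by omega, c3, c4⟩
  | case3 lo hi hlohi =>
    intro h1 h2 h3 h4 h5 h6
    have hlh : lo = hi := by omega
    subst hlh
    exact ⟨le_refl _, le_refl _, h5, h6⟩

theorem pairs_map_fst (ft : List Int) : (pvPairs ft).map Prod.fst = ft := by
  rw [pvPairs, List.map_map]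
  rw [show (Prod.fst ∘ fun it : Int × Int => (it.2, it.1 + 1))
    = (fun it : Int × Int => it.2) from rfl]
  rw [PySem.List.map_snd_enumerate]

theorem pairs_len (ft : List Int) : (pvPairs ft).length = ft.length := by
  simp [pvPairs, PySem.List.length_enumerate]

theorem s0_perm (ft : List Int) : (pvS0 ft).Perm (pvPairs ft) := by
  simpa using PySem.List.sorted_perm (pvPairs ft) (fun p : Int × Int => toLex p) false

theorem s0_len (ft : List Int) : (pvS0 ft).length = ft.length := by
  rw [(s0_perm ft).length_eq, pairs_len]

theorem fst_s0 (ft : List Int) :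
    (pvS0 ft).map Prod.fst = PySem.List.sorted ft (fun x => x) false := by
  have fstle : ∀ {a b : Int × Int}, toLex a ≤ toLex b → a.1 ≤ b.1 := by
    intro a b h
    rcases Prod.Lex.toLex_le_toLex.mp h with h | ⟨h, _⟩
    · exact le_of_lt h
    · exact le_of_eq h
  refine List.Perm.eq_of_pairwise' (r := fun a b : Int => a ≤ b) ?_ ?_ ?_
  · exact List.pairwise_map.mpr
      ((PySem.List.sorted_pairwise (pvPairs ft) (fun p : Int × Int => toLex p)).imp
        (fun h => fstle h))
  · exact PySem.List.sorted_pairwise ft (fun x => x)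
  · refine (((s0_perm ft).map Prod.fst).trans ?_).trans
      (PySem.List.sorted_perm ft (fun x => x) false).symm
    rw [pairs_map_fst]

theorem vs_len (ft : List Int) :
    (PySem.List.sorted ft (fun x => x) false).length = ft.length := by
  exact (PySem.List.sorted_perm ft (fun x => x) false).length_eq

theorem s0_fst_getD (ft : List Int) (j : Nat) (hj : j < ft.length) :
    ((pvS0 ft)[j]'(by rw [s0_len]; omega)).1
      = (PySem.List.sorted ft (fun x => x) false).getD j 0 := by
  have hjs : j < (pvS0 ft).length := by rw [s0_len]; omega
  have h2 : (PySem.List.sorted ft (fun x => x) false)[j]?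
      = ((pvS0 ft).map Prod.fst)[j]? := by rw [fst_s0]
  rw [List.getD_eq_getElem?_getD, h2, List.getElem?_map,
    List.getElem?_eq_getElem hjs]
  rfl

theorem pairs_snd_pairwise (ft : List Int) :
    (pvPairs ft).Pairwise (fun a b => a.2 < b.2) := by
  exact List.pairwise_map.mpr
    ((PySem.List.pairwise_lt_enumerate ft 0).imp (fun h => by omega))

theorem walk_step (ft : List Int) (K : Int) (j : Nat)
    (hj : j < ft.length)
    (hcond : pvC (PySem.List.sorted ft (fun x => x) false) (j + 1) ≤ K) :
    pvWalk ((pvS0 ft).drop j) (K - pvC (PySem.List.sorted ft (fun x => x) false) j)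
        (pvPrev (PySem.List.sorted ft (fun x => x) false) j)
      = pvWalk ((pvS0 ft).drop (j + 1))
        (K - pvC (PySem.List.sorted ft (fun x => x) false) (j + 1))
        (pvPrev (PySem.List.sorted ft (fun x => x) false) (j + 1)) := by
  have hjs : j < (pvS0 ft).length := by rw [s0_len]; omega
  have hdrop : (pvS0 ft).drop j = (pvS0 ft)[j] :: (pvS0 ft).drop (j + 1) :=
    List.drop_eq_getElem_cons hjs
  have hlen2 : ((pvS0 ft)[j] :: (pvS0 ft).drop (j + 1)).length = ft.length - j := by
    simp only [List.length_cons, List.length_drop, s0_len]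
    omega
  have hcast : (((ft.length - j : Nat) : Nat) : Int) = (ft.length : Int) - (j : Int) := by
    omega
  have hsucc := pvC_succ (PySem.List.sorted ft (fun x => x) false) j (by rw [vs_len]; omega)
  rw [vs_len] at hsucc
  rw [hdrop, pvWalk, hlen2, hcast, s0_fst_getD ft j hj]
  have hc : ((PySem.List.sorted ft (fun x => x) false).getD j 0
        - pvPrev (PySem.List.sorted ft (fun x => x) false) j)
        * ((ft.length : Int) - (j : Int))
      ≤ K - pvC (PySem.List.sorted ft (fun x => x) false) j := by
    omega
  rw [if_pos hc]
  have hprev : pvPrev (PySem.List.sorted ft (fun x => x) false) (j + 1)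
      = (PySem.List.sorted ft (fun x => x) false).getD j 0 := by
    rw [pvPrev, if_neg (by omega)]
    norm_num
  have hK : K - pvC (PySem.List.sorted ft (fun x => x) false) j
      - ((PySem.List.sorted ft (fun x => x) false).getD j 0
        - pvPrev (PySem.List.sorted ft (fun x => x) false) j)
        * ((ft.length : Int) - (j : Int))
      = K - pvC (PySem.List.sorted ft (fun x => x) false) (j + 1) := by
    omega
  rw [hK, hprev]

theorem walk_steps (ft : List Int) (K : Int) (k : Nat)
    (hk : k < ft.length)
    (hsteps : ∀ j : Nat, j < k →
      pvC (PySem.List.sorted ft (fun x => x) false) (j + 1) ≤ K) :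
    ∀ (d j : Nat), j + d = k →
      pvWalk ((pvS0 ft).drop j) (K - pvC (PySem.List.sorted ft (fun x => x) false) j)
          (pvPrev (PySem.List.sorted ft (fun x => x) false) j)
        = pvWalk ((pvS0 ft).drop k)
          (K - pvC (PySem.List.sorted ft (fun x => x) false) k)
          (pvPrev (PySem.List.sorted ft (fun x => x) false) k) := by
  intro d
  induction d with
  | zero =>
    intro j hjk
    have : j = k := by omega
    subst this
    rfl
  | succ d ih =>
    intro j hjk
    rw [walk_step ft K j (by omega) (hsteps j (by omega))]
    exact ih (j + 1) (by omega)

-- after k pops the remaining pairs, re-sorted by index, are the pairs of the original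
-- list whose value exceeds the threshold vs[k-1] (all pairs when k = 0)
theorem sortedRem_eq (ft : List Int) (K : Int) (k : Nat) (hk : k < ft.length)
    (hCk : k = 0 ∨ pvC (PySem.List.sorted ft (fun x => x) false) k ≤ K)
    (hstop : K < pvC (PySem.List.sorted ft (fun x => x) false) (k + 1)) :
    PySem.List.sorted ((pvS0 ft).drop k) (fun p => p.2) false
      = if k = 0 then pvPairs ft
        else (pvPairs ft).filter
          (fun p => decide ((PySem.List.sorted ft (fun x => x) false).getD (k - 1) 0 < p.1)) := by
  rcases Nat.eq_zero_or_pos k with h0 | h0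
  · subst h0
    rw [if_pos rfl, List.drop_zero]
    exact PySem.List.sorted_eq_of_perm_of_pairwise_lt _ _ (fun p : Int × Int => p.2)
      ((s0_perm ft).symm) (pairs_snd_pairwise ft)
  · rw [if_neg (by omega)]
    have hCklt : pvC (PySem.List.sorted ft (fun x => x) false) k
        < pvC (PySem.List.sorted ft (fun x => x) false) (k + 1) := by
      rcases hCk with h | h
      · omega
      · omega
    have hsucc := pvC_succ (PySem.List.sorted ft (fun x => x) false) k (by rw [vs_len]; omega)
    have hprev : pvPrev (PySem.List.sorted ft (fun x => x) false) k
        = (PySem.List.sorted ft (fun x => x) false).getD (k - 1) 0 := by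
      rw [pvPrev, if_neg (by omega)]
    rw [hprev, vs_len] at hsucc
    have hgap : (PySem.List.sorted ft (fun x => x) false).getD (k - 1) 0
        < (PySem.List.sorted ft (fun x => x) false).getD k 0 := by
      by_contra hcon
      push_neg at hcon
      have hm : (0 : Int) < (ft.length : Int) - (k : Int) := by omega
      nlinarith
    have hmono : ∀ p q : Nat, p ≤ q → q < ft.length →
        (PySem.List.sorted ft (fun x => x) false).getD p 0
          ≤ (PySem.List.sorted ft (fun x => x) false).getD q 0 := by
      intro p q hpq hq
      rw [List.getD_eq_getElem _ _ (by rw [vs_len]; omega),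
        List.getD_eq_getElem _ _ (by rw [vs_len]; omega)]
      exact PySem.List.sorted_id_getElem_mono ft hpq (by rw [PySem.List.length_sorted]; omega)
    -- elements of the dropped prefix are ≤ thr, elements of the kept suffix are > thr
    have htake : ∀ p ∈ (pvS0 ft).take k,
        ¬ ((PySem.List.sorted ft (fun x => x) false).getD (k - 1) 0 < p.1) := by
      intro p hp
      obtain ⟨i, hi, hpi⟩ := List.getElem_of_mem hp
      rw [List.length_take] at hi
      have hik : i < k := by omega
      have hilen : i < ft.length := by omega
      rw [← hpi, List.getElem_take]
      rw [s0_fst_getD ft i hilen]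
      have := hmono i (k - 1) (by omega) (by omega)
      omega
    have hdropmem : ∀ p ∈ (pvS0 ft).drop k,
        (PySem.List.sorted ft (fun x => x) false).getD (k - 1) 0 < p.1 := by
      intro p hp
      obtain ⟨i, hi, hpi⟩ := List.getElem_of_mem hp
      rw [List.length_drop, s0_len] at hi
      have hilen : k + i < ft.length := by omega
      rw [← hpi, List.getElem_drop]
      rw [s0_fst_getD ft (k + i) hilen]
      have := hmono k (k + i) (by omega) (by omega)
      omega
    have hfiltdrop : (pvS0 ft).filter
        (fun p => decide ((PySem.List.sorted ft (fun x => x) false).getD (k - 1) 0 < p.1))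
        = (pvS0 ft).drop k := by
      conv_lhs => rw [← List.take_append_drop k (pvS0 ft)]
      rw [List.filter_append]
      rw [List.filter_eq_nil_iff.mpr (by
        intro p hp
        simpa using htake p hp)]
      rw [List.filter_eq_self.mpr (by
        intro p hp
        simpa using hdropmem p hp)]
      rfl
    refine PySem.List.sorted_eq_of_perm_of_pairwise_lt _ _ (fun p : Int × Int => p.2)
      ?_ ((pairs_snd_pairwise ft).filter _)
    rw [← hfiltdrop]
    exact ((s0_perm ft).filter _).symm

theorem survivors_eq (ft : List Int) (K : Int) (k : Nat) (hk : k < ft.length)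
    (hCk : k = 0 ∨ pvC (PySem.List.sorted ft (fun x => x) false) k ≤ K)
    (hstop : K < pvC (PySem.List.sorted ft (fun x => x) false) (k + 1)) :
    pvSurvivors ft (PySem.List.sorted ft (fun x => x) false) ft.length k
      = (PySem.List.sorted ((pvS0 ft).drop k) (fun p => p.2) false).map Prod.snd := by
  rw [sortedRem_eq ft K k hk hCk hstop]
  rcases Nat.eq_zero_or_pos k with h0 | h0
  · subst h0
    rw [if_pos rfl, pvSurvivors, if_pos rfl]
    rw [pvPairs, List.map_map]
    rw [show (Prod.snd ∘ fun it : Int × Int => (it.2, it.1 + 1))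
      = (fun it : Int × Int => it.1 + 1) from rfl]
    rw [show (fun it : Int × Int => it.1 + 1)
      = ((fun x : Int => x + 1) ∘ fun it : Int × Int => it.1) from rfl]
    rw [← List.map_map, PySem.List.map_fst_enumerate]
    rw [PySem.List.pyRange_one, PySem.List.pyRange_one]
    rw [List.map_map]
    have hlen : ((0 : Int) + (ft.length : Int) - 0).toNat = ((ft.length : Int) + 1 - 1).toNat := by
      omega
    rw [hlen]
    apply List.map_congr_left
    intro a ha
    simp
    omega
  · rw [if_neg (by omega), pvSurvivors, if_neg (by omega)]
    have hcast : ((k : Int) - 1) = (((k - 1 : Nat) : Nat) : Int) := by omega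
    rw [hcast, PySem.List.pyGetD_natCast]
    rw [pvPairs, List.filter_map, List.map_map]
    rfl
theorem solution_eq (food_times : List Int) (K : Int)
    (hpre : food_times ≠ [] ∨ 0 ≤ K) :
    solution food_times K = solution_alt food_times K := by
  by_cases hs : food_times.sum ≤ K
  · simp [solution, solution_alt, hs]
  · have hne : food_times ≠ [] := by
      rcases hpre with h | h
      · exact h
      · intro h0
        subst h0
        simp at hs
        omega
    have hn1 : 1 ≤ food_times.length := by
      have := List.length_pos_iff.mpr hne
      omega
    have hvl : (PySem.List.sorted food_times (fun x => x) false).length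
        = food_times.length := vs_len food_times
    have hsort : (PySem.List.sorted food_times (fun x => x) false).Pairwise
        (fun a b : Int => a ≤ b) :=
      PySem.List.sorted_pairwise food_times (fun x => x)
    have hvsum : (PySem.List.sorted food_times (fun x => x) false).sum
        = food_times.sum :=
      (PySem.List.sorted_perm food_times (fun x => x) false).sum_eq
    have hcost1 : pvCost (PySem.List.sorted food_times (fun x => x) false)
        (pvBuildPrefix (PySem.List.sorted food_times (fun x => x) false))
        food_times.length 1
        = pvC (PySem.List.sorted food_times (fun x => x) false) 1 := by
      rw [← hvl]
      exact cost_eq _ 1 (by omega)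
    set k := if K < pvCost (PySem.List.sorted food_times (fun x => x) false)
        (pvBuildPrefix (PySem.List.sorted food_times (fun x => x) false))
        food_times.length 1 then 0
      else pvBisect (PySem.List.sorted food_times (fun x => x) false)
        (pvBuildPrefix (PySem.List.sorted food_times (fun x => x) false))
        food_times.length K 1 (food_times.length - 1) with hkdef
    have hkfacts : k < food_times.length ∧
        (k = 0 ∨ pvC (PySem.List.sorted food_times (fun x => x) false) k ≤ K) ∧
        K < pvC (PySem.List.sorted food_times (fun x => x) false) (k + 1) := by
      by_cases hc1 : K < pvCost (PySem.List.sorted food_times (fun x => x) false)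
          (pvBuildPrefix (PySem.List.sorted food_times (fun x => x) false))
          food_times.length 1
      · rw [hkdef, if_pos hc1]
        rw [hcost1] at hc1
        exact ⟨by omega, Or.inl rfl, hc1⟩
      · rw [hkdef, if_neg hc1]
        rw [hcost1] at hc1
        push_neg at hc1
        have hKsum : K < pvC (PySem.List.sorted food_times (fun x => x) false)
            (PySem.List.sorted food_times (fun x => x) false).length := by
          rw [pvC_length _ (by
            intro h0
            rw [h0] at hvl
            simp at hvl
            omega), hvsum]
          omega
        have hn2 : 2 ≤ food_times.length := by
          by_contra hcon
          have h1 : food_times.length = 1 := by omega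
          rw [hvl, h1] at hKsum
          omega
        have := bisect_spec (PySem.List.sorted food_times (fun x => x) false)
          food_times.length K hvl.symm 1 (food_times.length - 1)
          (le_refl 1) (by omega) (le_refl _) (by omega) hc1
          (by
            have he : food_times.length - 1 + 1 = food_times.length := by omega
            rw [he, ← hvl]
            exact hKsum)
        obtain ⟨c1, c2, c3, c4⟩ := this
        exact ⟨by omega, Or.inr c3, c4⟩
    obtain ⟨hklt, hCk, hstop⟩ := hkfacts
    rw [solution_walk food_times K hpre hs]
    have h0eq : pvWalk (pvS0 food_times) K 0
        = pvWalk ((pvS0 food_times).drop 0)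
          (K - pvC (PySem.List.sorted food_times (fun x => x) false) 0)
          (pvPrev (PySem.List.sorted food_times (fun x => x) false) 0) := by
      rw [List.drop_zero, pvC, if_pos rfl, pvPrev, if_pos rfl]
      norm_num
    rw [h0eq, walk_steps food_times K k hklt
      (by
        intro j hjk
        rcases hCk with h | h
        · omega
        · exact le_trans (pvC_mono _ hsort (j + 1) k (by omega) (by omega) (by omega)) h)
      k 0 (by omega)]
    have hks : k < (pvS0 food_times).length := by rw [s0_len]; omega
    have hdrop : (pvS0 food_times).drop k
        = (pvS0 food_times)[k] :: (pvS0 food_times).drop (k + 1) :=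
      List.drop_eq_getElem_cons hks
    have hlen2 : ((pvS0 food_times)[k] :: (pvS0 food_times).drop (k + 1)).length
        = food_times.length - k := by
      simp only [List.length_cons, List.length_drop, s0_len]
      omega
    have hcast : (((food_times.length - k : Nat) : Nat) : Int)
        = (food_times.length : Int) - (k : Int) := by omega
    have hsucc := pvC_succ (PySem.List.sorted food_times (fun x => x) false) k
      (by omega)
    rw [hvl] at hsucc
    rw [hdrop, pvWalk, hlen2, hcast, s0_fst_getD food_times k hklt]
    rw [if_neg (by omega)]
    rw [← hdrop]
    simp only [solution_alt]
    rw [if_neg hs]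
    rw [← hkdef]
    have hsurv := survivors_eq food_times K k hklt hCk hstop
    have hcostk : pvCost (PySem.List.sorted food_times (fun x => x) false)
        (pvBuildPrefix (PySem.List.sorted food_times (fun x => x) false))
        food_times.length k
        = pvC (PySem.List.sorted food_times (fun x => x) false) k := by
      rw [← hvl]
      exact cost_eq _ k (by omega)
    rw [hcostk, hsurv]
    have hremlen : (PySem.List.sorted ((pvS0 food_times).drop k)
        (fun p : Int × Int => p.2) false).length = food_times.length - k := by
      rw [PySem.List.length_sorted, List.length_drop, s0_len]
    have hlenpos : (0 : Int) < (((food_times.length - k : Nat) : Nat) : Int) := by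
      omega
    have hmod0 := PySem.Int.mod_nonneg
      (K - pvC (PySem.List.sorted food_times (fun x => x) false) k) hlenpos
    have hmodlt := PySem.Int.mod_lt
      (K - pvC (PySem.List.sorted food_times (fun x => x) false) k) hlenpos
    rw [hcast] at hmod0 hmodlt
    rw [List.length_map, hremlen, hcast]
    set idx := PySem.Int.mod
      (K - pvC (PySem.List.sorted food_times (fun x => x) false) k)
      ((food_times.length : Int) - (k : Int)) with hidx
    have hidxlt : idx.toNat < (PySem.List.sorted ((pvS0 food_times).drop k)
        (fun p : Int × Int => p.2) false).length := by
      rw [hremlen]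
      omega
    rw [PySem.List.pyGet?_of_nonneg _ hmod0, PySem.List.pyGet?_of_nonneg _ hmod0]
    rw [List.getElem?_eq_getElem hidxlt,
      List.getElem?_eq_getElem (by rw [List.length_map]; exact hidxlt)]
    rw [List.getElem_map]

-- ===== VERDICT (by name: the statement is the Claim_ definition above) =====
theorem solution_spec : Claim_equal_solution := by
  intro food_times K _ hpre
  unfold Spec_solution
  exact solution_eq food_times K hpre
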